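-- pv_equiv track=rewrite | github.com/Wizard-collab/wizard_2 | softwares/guerilla_render_wizard/guerilla_shader.py | get_textures_dic
-- ===== SOURCE A (Python) =====
-- def get_udim_path(path):
--     items = path.split('.')
--     extension = items.pop(-1)
--     try:
--         int(items[-1])
--         items.pop(-1)
--         path = ('.').join(items + ['%d', extension])
--     except:
--         path = ('.').join(items + [extension])
--     return path
--
-- def get_textures_dic(files_list):
--     textures_dic = dict()
--
--     diffuse_maps = []
--     roughness_maps = []
--     metalness_maps = []
--     normal_maps = []
--     height_maps = []
--
--     for file in files_list:
--         file = file.replace('\\', '/')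
--         if 'COLOR' in file.upper():
--             diffuse_maps.append(file)
--         if 'ROUGHNESS' in file.upper():
--             roughness_maps.append(file)
--         if 'METAL' in file.upper():
--             metalness_maps.append(file)
--         if 'NORMAL' in file.upper():
--             normal_maps.append(file)
--         if 'HEIGHT' in file.upper():
--             height_maps.append(file)
--
--     if len(diffuse_maps) >=1:
--         texture = get_udim_path(diffuse_maps[0])
--         textures_dic['diffuse'] = texture
--     else:
--         textures_dic['diffuse'] = None
--
--     if len(roughness_maps) >=1:
--         texture = get_udim_path(roughness_maps[0])
--         textures_dic['roughness'] = texture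
--     else:
--         textures_dic['roughness'] = None
--
--     if len(metalness_maps) >=1:
--         texture = get_udim_path(metalness_maps[0])
--         textures_dic['metalness'] = texture
--     else:
--         textures_dic['metalness'] = None
--
--     if len(normal_maps) >=1:
--         texture = get_udim_path(normal_maps[0])
--         textures_dic['normal_map'] = texture
--     else:
--         textures_dic['normal_map'] = None
--
--     if len(height_maps) >=1:
--         texture = get_udim_path(height_maps[0])
--         textures_dic['height_map'] = texture
--     else:
--         textures_dic['height_map'] = None
--
--     return textures_dic
-- ===== SOURCE B (Python) =====
-- def get_udim_path(path):
--     items = path.split('.')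
--     extension = items.pop(-1)
--     try:
--         int(items[-1])
--         items.pop(-1)
--         path = ('.').join(items + ['%d', extension])
--     except:
--         path = ('.').join(items + [extension])
--     return path
--
-- def get_textures_dic(files_list):
--     def first(kw):
--         for f in files_list:
--             f = f.replace('\\', '/')
--             if kw in f.upper():
--                 return get_udim_path(f)
--         return None
--     return {key: first(kw) for key, kw in
--             [('diffuse', 'COLOR'), ('roughness', 'ROUGHNESS'),
--              ('metalness', 'METAL'), ('normal_map', 'NORMAL'),
--              ('height_map', 'HEIGHT')]}
-- ===== Notes on version B (the rewrite author's own statement) =====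
-- stated objective: simpler
-- what changed: Replaces the single accumulating pass that builds five category lists and indexes [0] with a data-driven (key, keyword) table and a per-keyword short-circuiting first-match scan.
import Mathlib
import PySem

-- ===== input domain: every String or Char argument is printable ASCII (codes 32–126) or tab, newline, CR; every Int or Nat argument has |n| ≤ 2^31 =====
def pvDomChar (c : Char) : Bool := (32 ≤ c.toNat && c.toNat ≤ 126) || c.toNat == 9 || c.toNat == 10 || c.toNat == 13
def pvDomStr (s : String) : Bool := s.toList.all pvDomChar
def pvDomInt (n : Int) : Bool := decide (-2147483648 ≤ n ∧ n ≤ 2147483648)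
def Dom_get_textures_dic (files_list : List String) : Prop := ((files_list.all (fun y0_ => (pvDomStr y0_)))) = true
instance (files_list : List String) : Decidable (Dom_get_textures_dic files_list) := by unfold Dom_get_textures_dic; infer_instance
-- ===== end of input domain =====

-- B replaces A's single accumulating pass (five category lists, then index [0]) with a
-- (key, keyword) table and a per-keyword short-circuiting first-match scan: simpler.

-- ===== PORT A =====
-- shared module helper (used verbatim by both Pythons)
def get_udim_path (path : String) : String :=
  match PySem.Str.split? path "." with
  | none => path  -- unreachable: the separator "." is nonempty
  | some items =>
  match PySem.List.pop? items (-1) with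
  | none => path  -- unreachable: split('.') is never empty
  | some (extension, items) =>
    -- try: int(items[-1]) …  except: …
    match PySem.List.pyGet? items (-1) with
    | none => PySem.Str.join "." (items ++ [extension])           -- IndexError caught
    | some last =>
      match PySem.Int.ofStr? last with
      | none => PySem.Str.join "." (items ++ [extension])         -- ValueError caught
      | some _ =>
        match PySem.List.pop? items (-1) with
        | none => path  -- unreachable: items nonempty here
        | some (_, items) => PySem.Str.join "." (items ++ ["%d", extension])

-- the body of A's for-loop, over the 5-list state (diffuse, roughness, metalness, normal, height)
def pvStepA (acc : List String × List String × List String × List String × List String)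
    (file : String) : List String × List String × List String × List String × List String :=
  let file := PySem.Str.replace file "\\" "/"
  let up := PySem.Str.upper file
  let d := if PySem.Str.isIn "COLOR" up then acc.1 ++ [file] else acc.1
  let r := if PySem.Str.isIn "ROUGHNESS" up then acc.2.1 ++ [file] else acc.2.1
  let m := if PySem.Str.isIn "METAL" up then acc.2.2.1 ++ [file] else acc.2.2.1
  let n := if PySem.Str.isIn "NORMAL" up then acc.2.2.2.1 ++ [file] else acc.2.2.2.1
  let h := if PySem.Str.isIn "HEIGHT" up then acc.2.2.2.2 ++ [file] else acc.2.2.2.2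
  (d, r, m, n, h)

-- A's 'if len(l) >= 1: get_udim_path(l[0]) else: None' (written once; A repeats it five times)
def pvEntry (l : List String) : Option String :=
  match l with
  | [] => none
  | x :: _ => some (get_udim_path x)

def get_textures_dic (files_list : List String) : List (String × Option String) :=
  let st := files_list.foldl pvStepA ([], [], [], [], [])
  let d0 : PySem.Dict String (Option String) := PySem.Dict.empty
  let d1 := d0.insert "diffuse" (pvEntry st.1)
  let d2 := d1.insert "roughness" (pvEntry st.2.1)
  let d3 := d2.insert "metalness" (pvEntry st.2.2.1)
  let d4 := d3.insert "normal_map" (pvEntry st.2.2.2.1)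
  let d5 := d4.insert "height_map" (pvEntry st.2.2.2.2)
  d5.items

-- ===== PORT B =====
def pvFirst (files_list : List String) (kw : String) : Option String :=
  match files_list with
  | [] => none
  | f :: rest =>
    let f := PySem.Str.replace f "\\" "/"
    if PySem.Str.isIn kw (PySem.Str.upper f) then some (get_udim_path f)
    else pvFirst rest kw

def get_textures_dic_alt (files_list : List String) : List (String × Option String) :=
  [("diffuse", "COLOR"), ("roughness", "ROUGHNESS"), ("metalness", "METAL"),
   ("normal_map", "NORMAL"), ("height_map", "HEIGHT")].map
    (fun p => (p.1, pvFirst files_list p.2))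

-- ===== PRECONDITION & SPEC =====
def Spec_get_textures_dic (files_list : List String) (out : List (String × Option String)) : Prop := out = get_textures_dic_alt files_list
instance (files_list : List String) (out : List (String × Option String)) : Decidable (Spec_get_textures_dic files_list out) := by unfold Spec_get_textures_dic; infer_instance

-- ===== CLAIM (what is proved, stated in full; the proofs are below) =====
def Claim_equal_get_textures_dic : Prop := ∀ (files_list : List String), Dom_get_textures_dic files_list → Spec_get_textures_dic files_list (get_textures_dic files_list)

-- ===== LEMMAS AND PROOFS =====

-- the files matching keyword kw, normalised, in order
def pvCat (kw : String) (fs : List String) : List String :=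
  (fs.map (fun f => PySem.Str.replace f "\\" "/")).filter
    (fun g => PySem.Str.isIn kw (PySem.Str.upper g))

theorem pvFold (fs : List String) (d r m n h : List String) :
    List.foldl pvStepA (d, r, m, n, h) fs =
      (d ++ pvCat "COLOR" fs, r ++ pvCat "ROUGHNESS" fs, m ++ pvCat "METAL" fs,
       n ++ pvCat "NORMAL" fs, h ++ pvCat "HEIGHT" fs) := by
  induction fs generalizing d r m n h with
  | nil => simp [pvCat]
  | cons f rest ih =>
    simp only [List.foldl_cons, pvStepA]
    rw [ih]
    simp only [pvCat, List.map_cons, List.filter_cons]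
    split_ifs <;> simp_all

theorem pvEntry_cat (fs : List String) (kw : String) :
    pvEntry (pvCat kw fs) = pvFirst fs kw := by
  induction fs with
  | nil => simp [pvCat, pvFirst, pvEntry]
  | cons f rest ih =>
    simp only [pvCat, List.map_cons, List.filter_cons] at *
    by_cases hc : PySem.Chars.isIn kw.toList (PySem.Chars.upper (PySem.Chars.replace f.toList ['\\'] ['/'])) = true
    · simp [pvFirst, hc, pvEntry]
    · simp only [PySem.Str.isIn_eq, PySem.Str.toList_upper, PySem.Str.toList_replace] at *
      simp [pvFirst, hc, ih]

theorem pvDict (a b c d e : Option String) :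
    (((((PySem.Dict.empty.insert "diffuse" a).insert "roughness" b).insert "metalness" c).insert
        "normal_map" d).insert "height_map" e).items
    = [("diffuse", a), ("roughness", b), ("metalness", c), ("normal_map", d), ("height_map", e)] := by
  simp [PySem.Dict.insert, PySem.Dict.empty, PySem.Dict.contains]

-- ===== VERDICT (by name: the statement is the Claim_ definition above) =====
theorem get_textures_dic_spec : Claim_equal_get_textures_dic := by
  intro fs _
  unfold Spec_get_textures_dic get_textures_dic get_textures_dic_alt
  rw [pvFold]
  simp only [List.nil_append, pvDict, List.map_cons, List.map_nil, pvEntry_cat]
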